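-- pv_equiv track=rewrite | github.com/nicoaira/FinAl-ReSi | fragments_finder.py | degenerated_to_regex
-- ===== SOURCE A (Python) =====
-- bases_dict=   {
--                     'A' : '[A]',
--                     'T' : '[T]',
--                     'C' : '[C]',
--                     'G' : '[G]',
--                     'R' : '[AG]',
--                     'Y' : '[CT]',
--                     'M' : '[AC]',
--                     'K' : '[GT]',
--                     'S' : '[CG]',
--                     'W' : '[AT]',
--                     'H' : '[ACT]',
--                     'B' : '[CGT]',
--                     'V' : '[ACG]',
--                     'D' : '[AGT]',
--                     'N' : '[ACGT]',
--                     }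
--
-- def degenerated_to_regex(site):
--
--     regex_string = []
--
--     c = 1
--
--     for base_pos in range(len(site)):
--
--         if base_pos != len(site) - 1:
--
--             if site[base_pos] == site[base_pos+1]:
--                 c += 1
--                 continue
--
--             else:
--                 base_expresion = bases_dict[site[base_pos]] + '{' + str(c) + '}'
--                 regex_string.append(base_expresion)
--                 c = 1
--         else:
--             base_expresion = bases_dict[site[base_pos]] + '{' + str(c) + '}'
--             regex_string.append(base_expresion)
--
--
--     return ''.join(regex_string)
-- ===== SOURCE B (Python) =====
-- bases_dict = {
--     'A': '[A]', 'T': '[T]', 'C': '[C]', 'G': '[G]',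
--     'R': '[AG]', 'Y': '[CT]', 'M': '[AC]', 'K': '[GT]',
--     'S': '[CG]', 'W': '[AT]', 'H': '[ACT]', 'B': '[CGT]',
--     'V': '[ACG]', 'D': '[AGT]', 'N': '[ACGT]',
-- }
--
-- def degenerated_to_regex(site):
--     n = len(site)
--     # stage 1: indices where a run ends (last index, or next char differs)
--     ends = [i for i in range(n) if i == n - 1 or site[i] != site[i + 1]]
--     # stage 2: each run starts right after the previous run's end
--     starts = [0] + [e + 1 for e in ends[:-1]]
--     # stage 3: emit one piece per (start, end) pair
--     return ''.join(bases_dict[site[e]] + '{' + str(e - s + 1) + '}'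
--                    for s, e in zip(starts, ends))
-- ===== Notes on version B (the rewrite author's own statement) =====
-- stated objective: alternative
-- what changed: Replaces A's stateful counter/lookahead loop by three staged passes: compute the run-end boundary indices by comparing each position with its successor, derive the run-start indices from the previous ends, then emit one regex piece per zipped (start, end) pair.
import Mathlib
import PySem

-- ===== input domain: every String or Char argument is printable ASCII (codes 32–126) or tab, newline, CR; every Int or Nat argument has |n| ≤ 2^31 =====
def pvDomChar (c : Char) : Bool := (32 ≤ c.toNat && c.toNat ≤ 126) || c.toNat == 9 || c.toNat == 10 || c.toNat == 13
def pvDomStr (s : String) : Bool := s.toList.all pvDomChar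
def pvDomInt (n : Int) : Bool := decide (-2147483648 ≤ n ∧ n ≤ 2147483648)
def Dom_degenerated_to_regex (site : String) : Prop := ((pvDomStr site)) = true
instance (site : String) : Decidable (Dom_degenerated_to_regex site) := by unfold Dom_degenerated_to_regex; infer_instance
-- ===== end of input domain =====

-- B replaces A's stateful counter/lookahead loop by three staged passes over indices
-- (run ends, then run starts, then pieces from zipped pairs); objective: alternative.

-- the module-level bases_dict, shared by both programs
def basesDict : PySem.Dict Char String := PySem.Dict.ofList
  [('A', "[A]"), ('T', "[T]"), ('C', "[C]"), ('G', "[G]"),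
   ('R', "[AG]"), ('Y', "[CT]"), ('M', "[AC]"), ('K', "[GT]"),
   ('S', "[CG]"), ('W', "[AT]"), ('H', "[ACT]"), ('B', "[CGT]"),
   ('V', "[ACG]"), ('D', "[AGT]"), ('N', "[ACGT]")]

-- bases_dict[b] + '{' + str(c) + '}'  (lookup total via getD; Pre_ keeps every char inside the dict)
def baseExpr (b : Char) (c : Int) : String :=
  ((basesDict.get? b).getD "") ++ "{" ++ PySem.Int.toStr c ++ "}"

-- ===== PORT A =====
-- A's for-loop over base_pos with state (regex_string, c): at each position it looks one
-- character ahead (base_pos != len-1 ⟺ a next character exists), so the loop is the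
-- recursion over the remaining characters with the SAME state (regex_string, c).
def loopA : List Char → List String → Int → List String
  | [], regex_string, _ => regex_string
  | [a], regex_string, c => regex_string ++ [baseExpr a c]      -- last position: append, done
  | a :: b :: rest, regex_string, c =>
      if a == b then loopA (b :: rest) regex_string (c + 1)     -- same as next: c += 1, continue
      else loopA (b :: rest) (regex_string ++ [baseExpr a c]) 1 -- run ends: append, reset c

def degenerated_to_regex (site : String) : String :=
  PySem.Str.join "" (loopA site.toList [] 1)

-- ===== PORT B =====
-- stage 1: [i for i in range(n) if i == n - 1 or site[i] != site[i + 1]]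
-- (every index Python actually evaluates is in range, so getD with a dummy default is exact)
def endsB (l : List Char) : List Nat :=
  (List.range l.length).filter
    (fun i => i == l.length - 1 || !(l.getD i ' ' == l.getD (i + 1) ' '))

-- stage 2 is [0] + [e+1 for e in ends[:-1]]; stage 3 emits pieces from zip(starts, ends)
def degenerated_to_regex_alt (site : String) : String :=
  PySem.Str.join ""
    ((((0 : Nat) :: (endsB site.toList).dropLast.map (· + 1)).zip (endsB site.toList)).map
      (fun p => baseExpr (site.toList.getD p.2 ' ') ((p.2 : Int) - (p.1 : Int) + 1)))

-- ===== PRECONDITION & SPEC =====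
-- A (and B) raise KeyError on any character outside bases_dict; exactly those inputs are excluded.
def Pre_degenerated_to_regex (site : String) : Prop :=
  site.toList.all (fun c => "ATCGRYMKSWHBVDN".toList.contains c) = true
instance (site : String) : Decidable (Pre_degenerated_to_regex site) := by unfold Pre_degenerated_to_regex; infer_instance

def pvWitness_degenerated_to_regex : String := "AT"

def Spec_degenerated_to_regex (site : String) (out : String) : Prop := out = degenerated_to_regex_alt site
instance (site : String) (out : String) : Decidable (Spec_degenerated_to_regex site out) := by unfold Spec_degenerated_to_regex; infer_instance

-- ===== CLAIM (what is proved, stated in full; the proofs are below) =====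
def Claim_equal_degenerated_to_regex : Prop := ∀ (site : String), Dom_degenerated_to_regex site → Pre_degenerated_to_regex site → Spec_degenerated_to_regex site (degenerated_to_regex site)

-- ===== LEMMAS AND PROOFS =====

-- canonical run decomposition, the common reference point of both proofs
def runsC : List Char → List String
  | [] => []
  | a :: rest =>
      baseExpr a (1 + ((rest.takeWhile (· == a)).length : Int))
        :: runsC (rest.dropWhile (· == a))
  termination_by l => l.length
  decreasing_by
    simp only [List.length_cons]
    exact Nat.lt_succ_of_le (List.length_dropWhile_le _ _)

-- A's loop produces runsC
theorem loopA_eq (l : List Char) : ∀ (a : Char) (rs : List String) (c : Int),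
    loopA (a :: l) rs c
      = rs ++ baseExpr a (c + ((l.takeWhile (· == a)).length : Int))
          :: runsC (l.dropWhile (· == a)) := by
  induction l with
  | nil => intro a rs c; simp [loopA, runsC]
  | cons b rest ih =>
      intro a rs c
      by_cases h : a = b
      · subst h
        simp only [loopA, beq_self_eq_true, if_true, List.takeWhile, List.dropWhile]
        rw [ih a rs (c + 1)]
        have : c + 1 + ((rest.takeWhile (· == a)).length : Int)
             = c + (((rest.takeWhile (· == a)).length + 1 : Nat) : Int) := by push_cast; ring
        rw [this]
        simp [List.length_cons]
      · have hb : (a == b) = false := beq_eq_false_iff_ne.mpr h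
        have hb' : (b == a) = false := beq_eq_false_iff_ne.mpr (Ne.symm h)
        simp only [loopA, hb, List.takeWhile, List.dropWhile, hb']
        rw [ih b (rs ++ [baseExpr a c]) 1]
        simp [runsC]

-- recursive characterisation of the run-end indices
def endsR : List Char → List Nat
  | [] => []
  | [_] => [0]
  | a :: b :: t =>
      if a == b then (endsR (b :: t)).map (· + 1)
      else 0 :: (endsR (b :: t)).map (· + 1)

theorem endsB_eq (l : List Char) : endsB l = endsR l := by
  induction l with
  | nil => rfl
  | cons a rest ih =>
      cases rest with
      | nil => rfl
      | cons b t =>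
          have hfilt : ∀ (l' : List Char) (x : Char),
              ((List.range (x :: l').length).filter
                (fun i => i == (x :: l').length - 1 ||
                  !((x :: l').getD i ' ' == (x :: l').getD (i + 1) ' ')))
              = (if (x :: l').getD 0 ' ' == (x :: l').getD 1 ' ' ∧ l' ≠ [] then [] else [0]) ++
                ((List.range l'.length).filter
                  (fun i => i == l'.length - 1 ||
                    !(l'.getD i ' ' == l'.getD (i + 1) ' '))).map (· + 1) := by
            intro l' x
            simp only [List.length_cons, List.range_succ_eq_map, List.filter_cons,
              List.filter_map]
            cases l' with
            | nil => simp
            | cons c t' =>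
                simp only [ne_eq, reduceCtorEq, not_false_iff, and_true]
                by_cases hx : x = c
                · subst hx
                  simp [Function.comp_def]
                · have : (x == c) = false := beq_eq_false_iff_ne.mpr hx
                  simp [this, Function.comp_def]
          unfold endsB at *
          rw [hfilt (b :: t) a, ih]
          by_cases h : a = b
          · subst h
            simp [endsR]
          · have hb : (a == b) = false := beq_eq_false_iff_ne.mpr h
            simp [endsR, hb]

theorem endsR_ne_nil (l : List Char) (h : l ≠ []) : endsR l ≠ [] := by
  induction l with
  | nil => exact absurd rfl h
  | cons a rest ih =>
      cases rest with
      | nil => simp [endsR]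
      | cons b t =>
          have h2 : endsR (b :: t) ≠ [] := ih (by simp)
          unfold endsR
          split_ifs <;> simp [h2]

-- peel the first run off endsR
theorem endsR_peel (rest : List Char) : ∀ (a : Char),
    endsR (a :: rest)
      = (rest.takeWhile (· == a)).length ::
        (endsR (rest.dropWhile (· == a))).map (· + ((rest.takeWhile (· == a)).length + 1)) := by
  induction rest with
  | nil => intro a; simp [endsR]
  | cons b t ih =>
      intro a
      by_cases h : a = b
      · subst h
        simp only [endsR, beq_self_eq_true, if_true, List.takeWhile, List.dropWhile]
        rw [ih a]
        simp only [List.map_cons, List.map_map, List.length_cons]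
        congr 1
      · have hb : (a == b) = false := beq_eq_false_iff_ne.mpr h
        have hb' : (b == a) = false := beq_eq_false_iff_ne.mpr (Ne.symm h)
        simp only [endsR, hb, List.takeWhile, hb', List.dropWhile, List.length_nil]
        simp

-- indexing inside the first run gives its character
theorem getD_run (a : Char) (d : List Char) : ∀ (t : List Char),
    (∀ x ∈ t, x = a) → ((a :: t) ++ d).getD t.length ' ' = a := by
  intro t
  induction t generalizing a d with
  | nil => intro _; rfl
  | cons c t' ih =>
      intro hall
      have hc : c = a := hall c (by simp)
      have : ((a :: c :: t') ++ d).getD (c :: t').length ' '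
           = ((c :: t') ++ d).getD t'.length ' ' := by simp
      rw [this, ih c d (fun x hx => (hall x (by simp [hx])).trans hc.symm)]
      exact hc

-- the B pipeline (on endsR) produces runsC
def pieceOf (l : List Char) (p : Nat × Nat) : String :=
  baseExpr (l.getD p.2 ' ') ((p.2 : Int) - (p.1 : Int) + 1)

theorem pieces_eq (n : Nat) : ∀ (l : List Char), l.length ≤ n →
    (((0 :: (endsR l).dropLast.map (· + 1)).zip (endsR l)).map (pieceOf l)) = runsC l := by
  induction n with
  | zero =>
      intro l hl
      have : l = [] := List.eq_nil_of_length_eq_zero (Nat.le_zero.mp hl)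
      subst this; simp [endsR, runsC]
  | succ n ih =>
      intro l hl
      cases l with
      | nil => simp [endsR, runsC]
      | cons a rest =>
          obtain ⟨t, d, ht, hd⟩ :
              ∃ t d, t = rest.takeWhile (· == a) ∧ d = rest.dropWhile (· == a) :=
            ⟨_, _, rfl, rfl⟩
          have hsplit : a :: rest = (a :: t) ++ d := by
            rw [ht, hd]; simp [List.takeWhile_append_dropWhile]
          have htall : ∀ x ∈ t, x = a := by
            intro x hx
            rw [ht] at hx
            have := List.mem_takeWhile_imp hx
            exact eq_of_beq (by simpa using this)
          have hget : (a :: rest).getD t.length ' ' = a := by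
            rw [hsplit]; exact getD_run a d t htall
          have hgetShift : ∀ e : Nat, (a :: rest).getD (e + (t.length + 1)) ' ' = d.getD e ' ' := by
            intro e
            rw [hsplit]
            have hlen : (a :: t).length = t.length + 1 := by simp
            rw [List.getD_eq_getElem?_getD, List.getElem?_append_right (by omega),
              ← List.getD_eq_getElem?_getD]
            congr 1
            omega
          have hdlen : d.length ≤ n := by
            have h1 : d.length ≤ rest.length := by rw [hd]; exact List.length_dropWhile_le _ _
            have h2 : rest.length + 1 ≤ n + 1 := by simpa using hl
            omega
          have hrc : runsC (a :: rest) = baseExpr a (1 + (t.length : Int)) :: runsC d := by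
            rw [runsC, ← ht, ← hd]
          have hhead : pieceOf (a :: rest) (0, t.length) = baseExpr a (1 + (t.length : Int)) := by
            simp only [pieceOf, hget]
            congr 1
            omega
          rw [endsR_peel rest a, ← ht, ← hd]
          by_cases hdnil : d = []
          · subst hdnil
            simp only [show endsR ([] : List Char) = [] from rfl, List.map_nil,
              List.dropLast, List.zip_cons_cons, List.zip_nil_right,
              List.map_cons, List.map_nil, hrc]
            simp [runsC, hhead]
          · have hne : endsR d ≠ [] := endsR_ne_nil d hdnil
            obtain ⟨m0, M, hM⟩ := List.exists_cons_of_ne_nil hne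
            have hdrop : (t.length :: (endsR d).map (· + (t.length + 1))).dropLast
                 = t.length :: ((endsR d).dropLast.map (· + (t.length + 1))) := by
              rw [hM]
              simp
            rw [hdrop]
            simp only [List.map_cons, List.zip_cons_cons, List.map_cons]
            have hshift : ((t.length + 1) :: ((endsR d).dropLast.map (· + (t.length + 1))).map (· + 1))
                 = ((0 : Nat) :: (endsR d).dropLast.map (· + 1)).map (· + (t.length + 1)) := by
              simp only [List.map_cons, List.map_map]
              congr 1
              · omega
              · refine List.map_congr_left ?_
                intro x _
                simp only [Function.comp_def]
                omega
            rw [hshift, List.zip_map, List.map_map]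
            have hmaps : (pieceOf (a :: rest)) ∘ (Prod.map (· + (t.length + 1)) (· + (t.length + 1)))
                 = pieceOf d := by
              funext p
              simp only [Function.comp_def, Prod.map, pieceOf]
              rw [hgetShift p.2]
              congr 1
              push_cast
              ring
            rw [hmaps, ih d hdlen, hrc, hhead]

-- ===== VERDICT (by name: the statement is the Claim_ definition above) =====
theorem degenerated_to_regex_spec : Claim_equal_degenerated_to_regex := by
  intro site _ _
  unfold Spec_degenerated_to_regex degenerated_to_regex degenerated_to_regex_alt
  rw [endsB_eq]
  have hB := pieces_eq site.toList.length site.toList (le_refl _)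
  rw [show (fun p : Nat × Nat =>
        baseExpr (site.toList.getD p.2 ' ') ((p.2 : Int) - (p.1 : Int) + 1))
      = pieceOf site.toList from rfl, hB]
  cases h : site.toList with
  | nil => simp [loopA, runsC]
  | cons a rest =>
      rw [loopA_eq rest a [] 1]
      simp [runsC]
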